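-- pv_equiv track=rewrite | github.com/Francisca105/ist-leic-a | FP/Semana 4/ex3.py | implodeWhile
-- ===== SOURCE A (Python) =====
-- def implodeWhile(tuplo):
--     number = 0
--     i = 0
--     length = len(tuplo)
--     while i < length:
--         element = tuplo[i]
--         if type(element) != int:
--             raise ValueError("elemento não inteiro")
--         number = number * 10 + element
--         i+=1
--
--     return number
-- ===== SOURCE B (Python) =====
-- def implodeWhile(tuplo):
--     number = 0
--     mult = 1
--     for i in range(len(tuplo) - 1, -1, -1):
--         element = tuplo[i]
--         if type(element) != int:
--             raise ValueError("elemento não inteiro")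
--         number += element * mult
--         mult *= 10
--     return number
-- ===== Notes on version B (the rewrite author's own statement) =====
-- stated objective: alternative
-- what changed: Replaces Horner's left-to-right repeated-scale accumulation with a right-to-left pass that adds each element times an explicit power-of-ten multiplier.
import Mathlib
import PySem

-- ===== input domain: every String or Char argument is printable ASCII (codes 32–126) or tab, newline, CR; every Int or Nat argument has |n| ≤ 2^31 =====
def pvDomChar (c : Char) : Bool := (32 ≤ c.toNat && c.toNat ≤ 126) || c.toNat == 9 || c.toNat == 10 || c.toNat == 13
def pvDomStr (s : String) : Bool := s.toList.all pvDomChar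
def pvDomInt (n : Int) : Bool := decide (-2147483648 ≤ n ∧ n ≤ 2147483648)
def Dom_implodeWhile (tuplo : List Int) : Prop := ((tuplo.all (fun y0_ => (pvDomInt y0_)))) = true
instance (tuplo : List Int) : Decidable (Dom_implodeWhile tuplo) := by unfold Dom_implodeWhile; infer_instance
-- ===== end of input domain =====

-- B replaces A's Horner left-to-right accumulation by a right-to-left pass with an
-- explicit power-of-ten multiplier (objective: alternative decomposition, same O(n) cost).

-- ===== PORT A =====
-- A's while loop over indices 0..len-1 doing number = number*10 + element
-- (the type check never fires: all elements are Int by the type convention).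
def implodeWhile (tuplo : List Int) : Int :=
  List.foldl (fun number element => number * 10 + element) 0 tuplo

-- ===== PORT B =====
-- B iterates right-to-left (range(len-1, -1, -1)) keeping (number, mult):
-- number += element * mult; mult *= 10.
def implodeWhile_alt (tuplo : List Int) : Int :=
  (List.foldl (fun (s : Int × Int) element => (s.1 + element * s.2, s.2 * 10))
    (0, 1) tuplo.reverse).1

-- ===== PRECONDITION & SPEC =====
def Spec_implodeWhile (tuplo : List Int) (out : Int) : Prop := out = implodeWhile_alt tuplo
instance (tuplo : List Int) (out : Int) : Decidable (Spec_implodeWhile tuplo out) := by unfold Spec_implodeWhile; infer_instance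

-- ===== CLAIM (what is proved, stated in full; the proofs are below) =====
def Claim_equal_implodeWhile : Prop := ∀ (tuplo : List Int), Dom_implodeWhile tuplo → Spec_implodeWhile tuplo (implodeWhile tuplo)

-- ===== LEMMAS AND PROOFS =====

theorem pv_alt_fold (l : List Int) : ∀ (n m : Int),
    (List.foldl (fun (s : Int × Int) element => (s.1 + element * s.2, s.2 * 10)) (n, m) l).1
      = n + m * List.foldl (fun a e => a * 10 + e) 0 l.reverse := by
  induction l with
  | nil => intro n m; simp
  | cons e l ih =>
      intro n m
      simp only [List.foldl_cons, List.reverse_cons, List.foldl_append, List.foldl_cons,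
        List.foldl_nil]
      rw [ih]
      ring

-- ===== VERDICT (by name: the statement is the Claim_ definition above) =====
theorem implodeWhile_spec : Claim_equal_implodeWhile := by
  intro tuplo _
  unfold Spec_implodeWhile implodeWhile implodeWhile_alt
  rw [pv_alt_fold, List.reverse_reverse]
  ring
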